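-- pv_equiv track=rewrite | github.com/pitiwatMIKE/argument_tagger | web-extration_tagger/utils/use.py | tag_html_format
-- ===== SOURCE A (Python) =====
-- def tag_html_format(predict_list, pos=False): # get ist of tuple 1 sentent [(word, pos, tag), .....]
--     text_result = ""
--     label_start = ""
--     start_tag = False
--     tag_label = ""
--
--     for token in predict_list: # list of tuple
--         if pos == True:
--             word = token[0]
--             tag = token[2]
--         else:
--             word = token[0]
--             tag = token[1]
--
--         if tag == "O":
--             if start_tag == True :
--                 label_end = "</claim>" if label_start == "<claim>" else "</premise>"
--                 text_result += label_end
--                 text_result += word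
--                 start_tag = False
--             else:
--                 text_result += word
--         else:
--             if start_tag == False:
--                 tag_label = tag.split("-")[1]  #I-c  = c
--                 label_start = "<claim>" if tag_label == "c" else "<premise>"
--                 text_result += label_start
--                 text_result += word
--                 start_tag = True
--             else:
--                 if tag_label != tag.split("-")[1]: #กรณีที่tag ต่างกันอยู่ติดกัน
--                     label_end = "</claim>" if label_start == "<claim>" else "</premise>"
--                     text_result += label_end
--                     tag_label = tag.split("-")[1]  #I-c  = c
--                     label_start = "<claim>" if tag_label == "c" else "<premise>"
--                     text_result += label_start
--                     text_result += word
--                     start_tag = True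
--                 else:
--                     text_result += word
--
--     if start_tag == True:
--         label_end = "</claim>" if label_start == "<claim>" else "</premise>"
--         text_result += label_end
--
--     return text_result
-- ===== SOURCE B (Python) =====
-- def tag_html_format(predict_list, pos=False):
--     # Run-based rewrite: key each token (None for "O", else tag.split("-")[1]),
--     # then emit consecutive equal-key runs at once.
--     keys = [None if (t[2] if pos else t[1]) == "O" else (t[2] if pos else t[1]).split("-")[1]
--             for t in predict_list]
--     parts = []
--     i, n = 0, len(predict_list)
--     while i < n:
--         j = i
--         while j < n and keys[j] == keys[i]:
--             j += 1
--         words = "".join(t[0] for t in predict_list[i:j])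
--         if keys[i] is None:
--             parts.append(words)
--         else:
--             if keys[i] == "c":
--                 parts.append("<claim>" + words + "</claim>")
--             else:
--                 parts.append("<premise>" + words + "</premise>")
--         i = j
--     return "".join(parts)
-- ===== Notes on version B (the rewrite author's own statement) =====
-- stated objective: alternative
-- what changed: Replaces A's token-by-token state machine (open-flag, current label and tag_label threaded through one fold) with a run-based pass: each token is keyed (None for 'O', else tag.split('-')[1]) and maximal runs of equal keys are emitted at once, O-runs as bare words and other runs wrapped in one open/close tag pair.
import Mathlib
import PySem

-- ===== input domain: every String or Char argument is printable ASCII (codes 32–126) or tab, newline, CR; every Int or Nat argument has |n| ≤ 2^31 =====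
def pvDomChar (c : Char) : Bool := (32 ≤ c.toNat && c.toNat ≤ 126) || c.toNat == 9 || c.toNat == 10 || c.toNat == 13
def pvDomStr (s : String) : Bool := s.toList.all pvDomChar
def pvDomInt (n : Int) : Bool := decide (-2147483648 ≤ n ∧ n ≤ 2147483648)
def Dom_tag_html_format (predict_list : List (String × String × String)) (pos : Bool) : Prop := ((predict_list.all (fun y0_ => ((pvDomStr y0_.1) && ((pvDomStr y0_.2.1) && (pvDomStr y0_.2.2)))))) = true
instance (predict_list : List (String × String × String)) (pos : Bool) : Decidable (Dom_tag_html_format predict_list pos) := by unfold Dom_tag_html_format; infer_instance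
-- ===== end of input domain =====

-- B rewrites A's flag-and-label state machine as a run-based pass (group consecutive
-- tokens with equal category key, emit each run at once); objective: alternative decomposition.

-- ===== PORT A =====
-- tag.split("-")[1]: split? is `some` for the nonempty separator "-"; the inner getD ""
-- is only reached when index 1 is missing, i.e. exactly where Python raises IndexError
-- (excluded by Pre_ below).
def pvSplit1 (tag : String) : String :=
  (PySem.List.pyGet? ((PySem.Str.split? tag "-").getD []) 1).getD ""

-- A's loop body; state = (text_result, label_start, start_tag, tag_label)
def pvStepA (pos : Bool) (st : String × String × Bool × String)
    (token : String × String × String) : String × String × Bool × String :=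
  let text_result := st.1
  let label_start := st.2.1
  let start_tag := st.2.2.1
  let tag_label := st.2.2.2
  let word := token.1
  let tag := if pos = true then token.2.2 else token.2.1
  if tag == "O" then
    if start_tag = true then
      let label_end := if label_start == "<claim>" then "</claim>" else "</premise>"
      (text_result ++ label_end ++ word, label_start, false, tag_label)
    else
      (text_result ++ word, label_start, start_tag, tag_label)
  else
    if start_tag = false then
      let tl := pvSplit1 tag
      let ls := if tl == "c" then "<claim>" else "<premise>"
      (text_result ++ ls ++ word, ls, true, tl)
    else
      if tag_label != pvSplit1 tag then
        let label_end := if label_start == "<claim>" then "</claim>" else "</premise>"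
        let tl := pvSplit1 tag
        let ls := if tl == "c" then "<claim>" else "<premise>"
        (text_result ++ label_end ++ ls ++ word, ls, true, tl)
      else
        (text_result ++ word, label_start, start_tag, tag_label)

def tag_html_format (predict_list : List (String × String × String)) (pos : Bool) : String :=
  let r := predict_list.foldl (pvStepA pos) ("", "", false, "")
  if r.2.2.1 = true then
    r.1 ++ (if r.2.1 == "<claim>" then "</claim>" else "</premise>")
  else r.1

-- ===== PORT B =====
-- key of a token: `none` for tag "O", else tag.split("-")[1]
def pvKey (pos : Bool) (t : String × String × String) : Option String :=
  let tag := if pos then t.2.2 else t.2.1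
  if tag == "O" then none else some (pvSplit1 tag)

-- B's outer while-loop: peel one maximal run of equal keys per step (the inner
-- `while keys[j] == keys[i]` is takeWhile/dropWhile), emit it, recurse on the rest.
def pvRuns : List (String × Option String) → String
  | [] => ""
  | (w, k) :: rest =>
    let run := rest.takeWhile (fun p => p.2 == k)
    let rest' := rest.dropWhile (fun p => p.2 == k)
    let words := run.foldl (fun acc p => acc ++ p.1) w
    (match k with
     | none => words
     | some s => (if s == "c" then "<claim>" else "<premise>") ++ words ++
                 (if s == "c" then "</claim>" else "</premise>")) ++ pvRuns rest'
termination_by l => l.length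
decreasing_by
  simp only [List.length_cons]
  exact Nat.lt_succ_of_le (List.length_dropWhile_le _ _)

def tag_html_format_alt (predict_list : List (String × String × String)) (pos : Bool) : String :=
  pvRuns (predict_list.map (fun t => (t.1, pvKey pos t)))

-- ===== PRECONDITION & SPEC =====
-- Pre_ excludes exactly the inputs where Python A raises IndexError: a token whose
-- selected tag is neither "O" nor contains "-" (then tag.split("-")[1] is out of range).
def Pre_tag_html_format (predict_list : List (String × String × String)) (pos : Bool) : Prop :=
  ∀ t ∈ predict_list,
    (if pos then t.2.2 else t.2.1) = "O" ∨ '-' ∈ (if pos then t.2.2 else t.2.1).toList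

instance (predict_list : List (String × String × String)) (pos : Bool) : Decidable (Pre_tag_html_format predict_list pos) := by
  unfold Pre_tag_html_format; infer_instance

def pvWitness_tag_html_format : (List (String × String × String)) × Bool :=
  ([("He ", "I-c", "O"), ("ran", "I-c", "O"), (". ", "O", "I-p"), ("Go", "B-p", "O")], false)

def Spec_tag_html_format (predict_list : List (String × String × String)) (pos : Bool) (out : String) : Prop := out = tag_html_format_alt predict_list pos
instance (predict_list : List (String × String × String)) (pos : Bool) (out : String) : Decidable (Spec_tag_html_format predict_list pos out) := by unfold Spec_tag_html_format; infer_instance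

-- ===== CLAIM (what is proved, stated in full; the proofs are below) =====
def Claim_equal_tag_html_format : Prop := ∀ (predict_list : List (String × String × String)) (pos : Bool), Dom_tag_html_format predict_list pos → Pre_tag_html_format predict_list pos → Spec_tag_html_format predict_list pos (tag_html_format predict_list pos)

-- ===== LEMMAS AND PROOFS =====

-- abbreviations for the four literal tags
def pvOpen (s : String) : String := if s == "c" then "<claim>" else "<premise>"
def pvCloseOf (l : String) : String := if l == "<claim>" then "</claim>" else "</premise>"
def pvClose (s : String) : String := if s == "c" then "</claim>" else "</premise>"

theorem pvCloseOf_open (s : String) : pvCloseOf (pvOpen s) = pvClose s := by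
  simp only [pvOpen, pvClose, pvCloseOf]
  by_cases h : s == "c" <;> simp [h]

-- A's step, keyed: what A's loop body does once the key of the token is computed
def pvStep : (String × String × Bool × String) → (String × Option String) →
    String × String × Bool × String
  | (t, l, true, tl), (w, none) => (t ++ pvCloseOf l ++ w, l, false, tl)
  | (t, l, false, tl), (w, none) => (t ++ w, l, false, tl)
  | (t, _, false, _), (w, some s) => (t ++ pvOpen s ++ w, pvOpen s, true, s)
  | (t, l, true, tl), (w, some s) =>
    if tl ≠ s then (t ++ pvCloseOf l ++ pvOpen s ++ w, pvOpen s, true, s)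
    else (t ++ w, l, true, tl)

def pvFinish (st : String × String × Bool × String) : String :=
  if st.2.2.1 then st.1 ++ pvCloseOf st.2.1 else st.1

theorem stepA_eq (pos : Bool) (st : String × String × Bool × String)
    (token : String × String × String) :
    pvStepA pos st token = pvStep st (token.1, pvKey pos token) := by
  obtain ⟨t, l, b, tl⟩ := st
  obtain ⟨w, t1, t2⟩ := token
  simp only [pvStepA, pvKey, pvStep, pvOpen, pvCloseOf]
  by_cases hp : pos = true <;> simp only [hp, if_true, Bool.false_eq_true, if_false] <;>
    [by_cases hO : t2 == "O"; by_cases hO : t1 == "O"] <;>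
    simp only [hO, if_true, Bool.false_eq_true, if_false] <;>
    cases b <;>
    simp [bne_iff_ne, pvSplit1]

theorem foldA_eq (pos : Bool) (l : List (String × String × String))
    (st : String × String × Bool × String) :
    l.foldl (pvStepA pos) st = (l.map (fun t => (t.1, pvKey pos t))).foldl pvStep st := by
  rw [List.foldl_map]
  have h : pvStepA pos = fun st tok => pvStep st (tok.1, pvKey pos tok) :=
    funext fun st => funext fun tok => stepA_eq pos st tok
  rw [h]

-- A = finish of the keyed fold
theorem tag_html_format_eq (predict_list : List (String × String × String)) (pos : Bool) :
    tag_html_format predict_list pos =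
      pvFinish ((predict_list.map (fun t => (t.1, pvKey pos t))).foldl pvStep ("", "", false, "")) := by
  simp only [tag_html_format, pvFinish, pvCloseOf, foldA_eq]

-- concatenation of the words of a keyed list
def pvJoinW : List (String × Option String) → String
  | [] => ""
  | p :: r => p.1 ++ pvJoinW r

theorem foldl_append_eq_joinW (l : List (String × Option String)) (a : String) :
    l.foldl (fun acc p => acc ++ p.1) a = a ++ pvJoinW l := by
  induction l generalizing a with
  | nil => simp [pvJoinW]
  | cons p r ih => simp [pvJoinW, ih, String.append_assoc]

-- unfolding of pvRuns on a cons, with the run words written via pvJoinW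
theorem pvRuns_cons (w : String) (k : Option String) (rest : List (String × Option String)) :
    pvRuns ((w, k) :: rest) =
      (match k with
       | none => w ++ pvJoinW (rest.takeWhile (fun p => p.2 == k))
       | some s => pvOpen s ++ (w ++ pvJoinW (rest.takeWhile (fun p => p.2 == k))) ++ pvClose s)
      ++ pvRuns (rest.dropWhile (fun p => p.2 == k)) := by
  rw [pvRuns.eq_def]
  simp only [foldl_append_eq_joinW, pvOpen, pvClose]

-- an "O" run can be consumed one word at a time
theorem pvJoin_none_absorb (r : List (String × Option String)) :
    pvJoinW (r.takeWhile (fun p => p.2 == (none : Option String))) ++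
      pvRuns (r.dropWhile (fun p => p.2 == (none : Option String))) = pvRuns r := by
  cases r with
  | nil => simp [pvRuns, pvJoinW]
  | cons p r =>
    obtain ⟨w2, k2⟩ := p
    cases k2 with
    | none =>
      rw [List.takeWhile_cons_of_pos (by rfl), List.dropWhile_cons_of_pos (by rfl)]
      simp only [pvJoinW]
      rw [pvRuns_cons]
    | some s =>
      rw [List.takeWhile_cons_of_neg (by simp), List.dropWhile_cons_of_neg (by simp)]
      simp [pvJoinW]

theorem pvRuns_cons_none (w : String) (r : List (String × Option String)) :
    pvRuns ((w, none) :: r) = w ++ pvRuns r := by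
  rw [pvRuns_cons]
  show w ++ _ ++ _ = _
  rw [String.append_assoc, pvJoin_none_absorb]

-- the main invariant: outside a span (first conjunct) and inside a span labelled s (second)
theorem pv_main (n : Nat) : ∀ l : List (String × Option String), l.length ≤ n →
    (∀ text lbl tl, pvFinish (l.foldl pvStep (text, lbl, false, tl)) = text ++ pvRuns l) ∧
    (∀ text s, pvFinish (l.foldl pvStep (text, pvOpen s, true, s)) =
      text ++ pvJoinW (l.takeWhile (fun p => p.2 == some s)) ++ pvClose s ++
        pvRuns (l.dropWhile (fun p => p.2 == some s))) := by
  induction n with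
  | zero =>
    intro l hl
    rw [List.length_eq_zero_iff.mp (Nat.le_zero.mp hl)]
    constructor
    · intro text lbl tl; simp [pvFinish, pvRuns]
    · intro text s; simp [pvFinish, pvRuns, pvJoinW, pvCloseOf_open, String.append_assoc]
  | succ n ih =>
    intro l hl
    cases l with
    | nil =>
      constructor
      · intro text lbl tl; simp [pvFinish, pvRuns]
      · intro text s; simp [pvFinish, pvRuns, pvJoinW, pvCloseOf_open, String.append_assoc]
    | cons p r =>
      obtain ⟨w, k⟩ := p
      have hr : r.length ≤ n := by
        simpa using Nat.lt_succ_iff.mp (Nat.lt_of_lt_of_le (by simp) hl)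
      constructor
      · intro text lbl tl
        cases k with
        | none =>
          simp only [List.foldl_cons, pvStep]
          rw [(ih r hr).1, pvRuns_cons_none, String.append_assoc]
        | some s =>
          simp only [List.foldl_cons, pvStep]
          rw [(ih r hr).2, pvRuns_cons]
          simp [String.append_assoc]
      · intro text s
        cases k with
        | none =>
          simp only [List.foldl_cons, pvStep]
          rw [(ih r hr).1, pvCloseOf_open]
          rw [List.takeWhile_cons_of_neg (by simp), List.dropWhile_cons_of_neg (by simp),
            pvRuns_cons_none]
          simp [pvJoinW, String.append_assoc]
        | some s' =>
          by_cases hss : s' = s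
          · subst hss
            simp only [List.foldl_cons, pvStep, ne_eq, not_true_eq_false, if_false]
            rw [(ih r hr).2]
            rw [List.takeWhile_cons_of_pos (by simp), List.dropWhile_cons_of_pos (by simp)]
            simp [pvJoinW, String.append_assoc]
          · simp only [List.foldl_cons, pvStep]
            rw [if_pos (show s ≠ s' from fun h => hss h.symm)]
            rw [(ih r hr).2, pvCloseOf_open]
            rw [List.takeWhile_cons_of_neg (by simp [hss]), List.dropWhile_cons_of_neg (by simp [hss]),
              pvRuns_cons]
            simp [pvJoinW, String.append_assoc]

-- ===== VERDICT (by name: the statement is the Claim_ definition above) =====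
theorem tag_html_format_spec : Claim_equal_tag_html_format := by
  intro predict_list pos _ _
  unfold Spec_tag_html_format tag_html_format_alt
  rw [tag_html_format_eq]
  have h := (pv_main (predict_list.map (fun t => (t.1, pvKey pos t))).length
      (predict_list.map (fun t => (t.1, pvKey pos t))) le_rfl).1 "" "" ""
  rw [h]
  simp
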